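-- pv_equiv track=rewrite | github.com/CodelixFthurRS/Python_Programming | Semua Proyek fibonacci/Implemen_Fibo_jadwalPekerja.py | optimalkan_penjadwalan_pekerja
-- ===== SOURCE A (Python) =====
-- def fibonacci(n):
--     if n <= 0:
--         return "Masukkan jumlah bulan yang valid (bilangan bulat positif)."
--     elif n == 1:
--         return [1]
--     elif n == 2:
--         return [1, 1]
--     else:
--         fib_list = [1, 1]
--         a, b = 1, 1
--         for _ in range(n - 2):
--             a, b = b, a + b
--             fib_list.append(b)
--         return fib_list
--
-- def optimalkan_penjadwalan_pekerja(bulan):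
--     if bulan <= 0:
--         return "Masukkan jumlah bulan yang valid (bilangan bulat positif)."
--
--     fib_list = fibonacci(bulan)
--
--     # Simulasikan penjadwalan pekerja berdasarkan urutan Fibonacci
--     jadwal_pekerja = [fib_list[0]]
--     for i in range(1, bulan):
--         jadwal_pekerja.append(jadwal_pekerja[i-1] + fib_list[i])
--
--     return jadwal_pekerja
-- ===== SOURCE B (Python) =====
-- def optimalkan_penjadwalan_pekerja(bulan):
--     if bulan <= 0:
--         return "Masukkan jumlah bulan yang valid (bilangan bulat positif)."
--     a, b = 1, 1
--     total = 0
--     hasil = []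
--     for _ in range(bulan):
--         total += a
--         hasil.append(total)
--         a, b = b, a + b
--     return hasil
-- ===== Notes on version B (the rewrite author's own statement) =====
-- stated objective: simpler
-- what changed: Replaces the two-pass structure (build the full Fibonacci list via a helper, then a second loop of running prefix sums indexing into it) with one fused loop that maintains the Fibonacci pair (a, b) and a running total, appending the total each iteration; no intermediate list and no helper.
import Mathlib
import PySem

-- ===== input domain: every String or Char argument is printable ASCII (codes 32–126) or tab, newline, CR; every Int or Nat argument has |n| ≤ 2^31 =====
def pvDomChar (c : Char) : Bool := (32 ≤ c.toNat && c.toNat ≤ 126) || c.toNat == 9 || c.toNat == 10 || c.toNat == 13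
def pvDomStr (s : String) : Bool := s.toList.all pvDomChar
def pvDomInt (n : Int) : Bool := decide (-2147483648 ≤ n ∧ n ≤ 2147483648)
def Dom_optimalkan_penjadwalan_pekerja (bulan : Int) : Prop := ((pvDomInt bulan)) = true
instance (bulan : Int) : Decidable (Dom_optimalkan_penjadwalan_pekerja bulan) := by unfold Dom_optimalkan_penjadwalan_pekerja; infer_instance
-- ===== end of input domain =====

-- B fuses A's two passes (Fibonacci-list helper + prefix-sum loop) into one loop over a
-- (fib pair, running total) state; equivalence proved on bulan ≥ 1 (A returns a string otherwise).

-- ===== PORT A =====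
-- loop of fibonacci(): for _ in range(n-2): a, b = b, a + b; fib_list.append(b)
def pvFibLoopA : Nat → Int → Int → List Int → List Int
  | 0, _, _, acc => acc
  | k + 1, a, b, acc => pvFibLoopA k b (a + b) (acc ++ [a + b])

-- fibonacci(n); for n ≤ 0 Python returns a string (outside Pre_): [] here
def pvFibonacciA (n : Int) : List Int :=
  if n ≤ 0 then []
  else if n = 1 then [1]
  else if n = 2 then [1, 1]
  else pvFibLoopA (n - 2).toNat 1 1 [1, 1]

-- loop: for i in range(1, bulan): jadwal.append(jadwal[i-1] + fib_list[i])
def pvJadwalLoopA (fib : List Int) : Nat → Int → List Int → List Int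
  | 0, _, acc => acc
  | k + 1, i, acc =>
      pvJadwalLoopA fib k (i + 1)
        (acc ++ [(PySem.List.pyGet? acc (i - 1)).getD 0 + (PySem.List.pyGet? fib i).getD 0])

def optimalkan_penjadwalan_pekerja (bulan : Int) : List Int :=
  if bulan ≤ 0 then []  -- Python returns a string here; excluded by Pre_
  else
    -- fib_list := fibonacci(bulan), used twice below
    pvJadwalLoopA (pvFibonacciA bulan) (bulan - 1).toNat 1
      [(PySem.List.pyGet? (pvFibonacciA bulan) 0).getD 0]

-- ===== PORT B =====
-- for _ in range(bulan): total += a; hasil.append(total); a, b = b, a + b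
def pvAltLoop : Nat → Int → Int → Int → List Int → List Int
  | 0, _, _, _, hasil => hasil
  | k + 1, a, b, total, hasil => pvAltLoop k b (a + b) (total + a) (hasil ++ [total + a])

def optimalkan_penjadwalan_pekerja_alt (bulan : Int) : List Int :=
  if bulan ≤ 0 then []  -- Python returns a string here; excluded by Pre_
  else pvAltLoop bulan.toNat 1 1 0 []

-- ===== PRECONDITION & SPEC =====
-- Pre_ excludes bulan ≤ 0, where A (and B) return an error STRING, not a list of ints.
def Pre_optimalkan_penjadwalan_pekerja (bulan : Int) : Prop := 1 ≤ bulan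
instance (bulan : Int) : Decidable (Pre_optimalkan_penjadwalan_pekerja bulan) := by
  unfold Pre_optimalkan_penjadwalan_pekerja; infer_instance
def pvWitness_optimalkan_penjadwalan_pekerja : Int := 5

def Spec_optimalkan_penjadwalan_pekerja (bulan : Int) (out : List Int) : Prop := out = optimalkan_penjadwalan_pekerja_alt bulan
instance (bulan : Int) (out : List Int) : Decidable (Spec_optimalkan_penjadwalan_pekerja bulan out) := by unfold Spec_optimalkan_penjadwalan_pekerja; infer_instance

-- ===== CLAIM (what is proved, stated in full; the proofs are below) =====
def Claim_equal_optimalkan_penjadwalan_pekerja : Prop := ∀ (bulan : Int), Dom_optimalkan_penjadwalan_pekerja bulan → Pre_optimalkan_penjadwalan_pekerja bulan → Spec_optimalkan_penjadwalan_pekerja bulan (optimalkan_penjadwalan_pekerja bulan)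

-- ===== LEMMAS AND PROOFS =====

-- the Fibonacci sequence with F(0) = F(1) = 1
def pvFib : Nat → Int
  | 0 => 1
  | 1 => 1
  | n + 2 => pvFib n + pvFib (n + 1)

-- sum of the first m Fibonacci numbers
def pvT (m : Nat) : Int := ((List.range m).map pvFib).sum

lemma pvT_succ (j : Nat) : pvT (j + 1) = pvT j + pvFib j := by
  simp [pvT, List.range_succ]

lemma pvFibLoopA_spec (k : Nat) : ∀ (j : Nat) (acc : List Int),
    pvFibLoopA k (pvFib j) (pvFib (j + 1)) acc
      = acc ++ (List.range k).map (fun i => pvFib (j + 2 + i)) := by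
  induction k with
  | zero => intro j acc; simp [pvFibLoopA]
  | succ k ih =>
      intro j acc
      have h : pvFib j + pvFib (j + 1) = pvFib (j + 2) := rfl
      rw [pvFibLoopA, h]
      rw [ih (j + 1) (acc ++ [pvFib (j + 2)])]
      simp [List.range_succ_eq_map, List.map_map, Function.comp]
      intro a _
      congr 1
      omega

lemma pvFibonacciA_eq (n : Int) (hn : 1 ≤ n) :
    pvFibonacciA n = (List.range n.toNat).map pvFib := by
  rcases eq_or_lt_of_le hn with h1 | h1
  · simp [pvFibonacciA, ← h1, List.range_succ]
    decide
  · rcases eq_or_lt_of_le (by omega : (2 : Int) ≤ n) with h2 | h2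
    · simp [pvFibonacciA, ← h2]
      decide
    · have hn0 : ¬ n ≤ 0 := by omega
      have hn1 : ¬ n = 1 := by omega
      have hn2 : ¬ n = 2 := by omega
      rw [pvFibonacciA, if_neg hn0, if_neg hn1, if_neg hn2]
      have := pvFibLoopA_spec (n - 2).toNat 0 [1, 1]
      simp only [pvFib] at this
      rw [this]
      have hsplit : n.toNat = 2 + (n - 2).toNat := by omega
      rw [hsplit, List.range_add, List.map_append]
      congr 1
      rw [List.map_map]
      rfl

-- invariant of A's prefix-sum loop: acc holds [pvT 1, …, pvT j] and fib is the full list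
lemma pvJadwalLoopA_spec (n : Nat) (k : Nat) : ∀ (j : Nat), 1 ≤ j → j + k = n →
    pvJadwalLoopA ((List.range n).map pvFib) k (j : Int)
        ((List.range j).map (fun i => pvT (i + 1)))
      = (List.range n).map (fun i => pvT (i + 1)) := by
  induction k with
  | zero => intro j _ hj; subst hj; simp [pvJadwalLoopA]
  | succ k ih =>
      intro j hj1 hjk
      rw [pvJadwalLoopA]
      have hidx : (j : Int) - 1 = ((j - 1 : Nat) : Int) := by omega
      have hacc : (PySem.List.pyGet? ((List.range j).map (fun i => pvT (i + 1))) ((j : Int) - 1)).getD 0 = pvT j := by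
        rw [hidx, PySem.List.pyGet?_natCast]
        have hlt : j - 1 < j := by omega
        simp [hlt]
        congr 1
        omega
      have hjn : j < n := by omega
      have hfib : (PySem.List.pyGet? ((List.range n).map pvFib) ((j : Int))).getD 0 = pvFib j := by
        rw [PySem.List.pyGet?_natCast]
        simp [hjn]
      rw [hacc, hfib]
      have hstep : (List.range j).map (fun i => pvT (i + 1)) ++ [pvT j + pvFib j]
          = (List.range (j + 1)).map (fun i => pvT (i + 1)) := by
        rw [List.range_succ, List.map_append]
        simp [pvT_succ]
      rw [hstep]
      have := ih (j + 1) (by omega) (by omega)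
      have hcast : ((j : Int) + 1) = ((j + 1 : Nat) : Int) := by push_cast; ring
      rw [hcast]
      exact this

lemma pvAltLoop_spec (k : Nat) : ∀ (j : Nat) (hasil : List Int),
    pvAltLoop k (pvFib j) (pvFib (j + 1)) (pvT j) hasil
      = hasil ++ (List.range k).map (fun i => pvT (j + 1 + i)) := by
  induction k with
  | zero => intro j hasil; simp [pvAltLoop]
  | succ k ih =>
      intro j hasil
      rw [pvAltLoop]
      have hfib : pvFib j + pvFib (j + 1) = pvFib (j + 2) := rfl
      have ht : pvT j + pvFib j = pvT (j + 1) := (pvT_succ j).symm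
      rw [hfib, ht, ih (j + 1) (hasil ++ [pvT (j + 1)])]
      simp [List.range_succ_eq_map, List.map_map, Function.comp]
      intro a _
      congr 1
      omega

-- ===== VERDICT (by name: the statement is the Claim_ definition above) =====
theorem optimalkan_penjadwalan_pekerja_spec : Claim_equal_optimalkan_penjadwalan_pekerja := by
  intro bulan _ hpre
  unfold Spec_optimalkan_penjadwalan_pekerja
  have hle : ¬ bulan ≤ 0 := by
    simp only [Pre_optimalkan_penjadwalan_pekerja] at hpre; omega
  unfold optimalkan_penjadwalan_pekerja optimalkan_penjadwalan_pekerja_alt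
  rw [if_neg hle, if_neg hle]
  have hpre' : 1 ≤ bulan := hpre
  rw [pvFibonacciA_eq bulan hpre']
  -- B side: run the fused loop from the initial state
  have hB := pvAltLoop_spec bulan.toNat 0 []
  simp only [pvFib, pvT, List.range_zero, List.map_nil, List.sum_nil, List.nil_append] at hB
  rw [hB]
  -- A side: initial element is fib[0] = pvT 1
  have h0 : (PySem.List.pyGet? ((List.range bulan.toNat).map pvFib) (0 : Int)).getD 0 = pvFib 0 := by
    have hlt : 0 < bulan.toNat := by omega
    have : ((0 : Nat) : Int) = (0 : Int) := rfl
    rw [← this, PySem.List.pyGet?_natCast]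
    simp [hlt]
  rw [h0]
  have hinit : [pvFib 0] = (List.range 1).map (fun i => pvT (i + 1)) := by decide
  rw [hinit]
  have hA := pvJadwalLoopA_spec bulan.toNat (bulan - 1).toNat 1 (by omega) (by omega)
  have hcast : ((1 : Nat) : Int) = (1 : Int) := rfl
  rw [hcast] at hA
  rw [hA]
  congr 1
  funext i
  congr 1
  omega
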